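-- pv_equiv track=rewrite | github.com/Alina1803/Zecpath_AI_pro | app/services/eligibility_engine21/rules_engine.py | check_certification
-- ===== SOURCE A (Python) =====
-- def normalize_text_list(items):
--     """
--     Normalize list of strings (lowercase + strip)
--     """
--     return [str(item).lower().strip() for item in items]
--
-- def check_certification(candidate, role):
--     certifications = normalize_text_list(candidate.get("certifications", []))
--
--     role = role.lower().strip().replace(" ", "_")
--
--     # 🔥 Chartered Accountant
--     if role == "chartered_accountant":
--         keywords = ["ca", "chartered accountant", "aca", "icai"]
--
--         return any(
--             any(keyword in cert for keyword in keywords)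
--             for cert in certifications
--         )
--
--     # 🔥 Auditor
--     elif role == "auditor":
--         keywords = ["ca", "cpa", "audit"]
--
--         return any(
--             any(keyword in cert for keyword in keywords)
--             for cert in certifications
--         )
--
--     # 🔥 Default → no strict certification required
--     return True
-- ===== SOURCE B (Python) =====
-- def normalize_text_list(items):
--     """
--     Normalize list of strings (lowercase + strip)
--     """
--     return [str(item).lower().strip() for item in items]
--
-- def check_certification(candidate, role):
--     role = role.lower().strip().replace(" ", "_")
--
--     if role == "chartered_accountant":
--         keywords = ["ca", "chartered accountant", "aca", "icai"]
--     elif role == "auditor":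
--         keywords = ["ca", "cpa", "audit"]
--     else:
--         # Default -> no strict certification required
--         return True
--
--     # One combined text: a keyword match in the blob is exactly a match in
--     # some single certification, since no keyword contains "\n".
--     blob = "\n".join(normalize_text_list(candidate.get("certifications", [])))
--     return any(keyword in blob for keyword in keywords)
-- ===== Notes on version B (the rewrite author's own statement) =====
-- stated objective: alternative
-- what changed: B replaces the nested any-over-any (scan every keyword in every certification) by joining all normalized certifications into one newline-separated blob and scanning each keyword once in that blob; the newline separator (absent from every keyword) makes the two tests provably equivalent.
import Mathlib
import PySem

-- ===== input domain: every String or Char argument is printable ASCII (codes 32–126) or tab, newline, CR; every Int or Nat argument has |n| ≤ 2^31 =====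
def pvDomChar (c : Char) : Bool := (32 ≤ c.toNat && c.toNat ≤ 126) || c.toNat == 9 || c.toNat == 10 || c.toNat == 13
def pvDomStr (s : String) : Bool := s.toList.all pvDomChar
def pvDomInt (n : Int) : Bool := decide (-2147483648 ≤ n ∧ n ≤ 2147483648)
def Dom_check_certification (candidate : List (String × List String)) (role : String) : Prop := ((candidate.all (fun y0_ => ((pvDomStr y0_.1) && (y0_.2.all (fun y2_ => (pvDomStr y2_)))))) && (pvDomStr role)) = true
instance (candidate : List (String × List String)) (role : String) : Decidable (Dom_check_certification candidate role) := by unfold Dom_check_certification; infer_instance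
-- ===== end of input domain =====

-- B joins the normalized certifications into one newline-separated blob and scans each
-- keyword once there, instead of A's nested any-over-any scan of every keyword in every
-- certification (alternative decomposition; the proof uses that no keyword contains '\n').

-- ===== PORT A =====
def normalize_text_list (items : List String) : List String :=
  items.map (fun item => PySem.Str.strip (PySem.Str.lower item))

def check_certification (candidate : List (String × List String)) (role : String) : Bool :=
  let certifications := normalize_text_list ((PySem.Dict.mk candidate).getD "certifications" [])
  let role := PySem.Str.replace (PySem.Str.strip (PySem.Str.lower role)) " " "_"
  if role == "chartered_accountant" then
    let keywords := ["ca", "chartered accountant", "aca", "icai"]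
    certifications.any (fun cert => keywords.any (fun keyword => PySem.Str.isIn keyword cert))
  else if role == "auditor" then
    let keywords := ["ca", "cpa", "audit"]
    certifications.any (fun cert => keywords.any (fun keyword => PySem.Str.isIn keyword cert))
  else
    true

-- ===== PORT B =====
def check_certification_alt (candidate : List (String × List String)) (role : String) : Bool :=
  let role := PySem.Str.replace (PySem.Str.strip (PySem.Str.lower role)) " " "_"
  let keywords? : Option (List String) :=
    if role == "chartered_accountant" then some ["ca", "chartered accountant", "aca", "icai"]
    else if role == "auditor" then some ["ca", "cpa", "audit"]
    else none   -- default -> no strict certification required (Source B's early `return True`)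
  match keywords? with
  | none => true
  | some keywords =>
    let blob := PySem.Str.join "\n" (normalize_text_list ((PySem.Dict.mk candidate).getD "certifications" []))
    keywords.any (fun keyword => PySem.Str.isIn keyword blob)

-- ===== PRECONDITION & SPEC =====
def Spec_check_certification (candidate : List (String × List String)) (role : String) (out : Bool) : Prop := out = check_certification_alt candidate role
instance (candidate : List (String × List String)) (role : String) (out : Bool) : Decidable (Spec_check_certification candidate role out) := by unfold Spec_check_certification; infer_instance

-- ===== CLAIM (what is proved, stated in full; the proofs are below) =====
def Claim_equal_check_certification : Prop := ∀ (candidate : List (String × List String)) (role : String), Dom_check_certification candidate role → Spec_check_certification candidate role (check_certification candidate role)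

-- ===== LEMMAS AND PROOFS =====

-- a prefix of l1 ++ c :: l2 avoiding c is a prefix of l1
lemma prefix_of_prefix_append_sep (c : Char) (s l1 l2 : List Char)
    (hc : c ∉ s) (h : s <+: l1 ++ c :: l2) : s <+: l1 := by
  induction s generalizing l1 with
  | nil => exact List.nil_prefix
  | cons x s ih =>
    cases l1 with
    | nil =>
      rcases h with ⟨t, ht⟩
      simp only [List.nil_append, List.cons_append, List.cons.injEq] at ht
      exact absurd (ht.1 ▸ List.mem_cons_self) hc
    | cons y l1 =>
      rcases h with ⟨t, ht⟩
      simp only [List.cons_append, List.cons.injEq] at ht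
      obtain ⟨rfl, ht⟩ := ht
      exact List.cons_prefix_cons.mpr
        ⟨rfl, ih l1 (fun hm => hc (List.mem_cons_of_mem _ hm)) ⟨t, ht⟩⟩

-- an infix of l1 ++ c :: l2 avoiding c lies inside l1 or inside l2
lemma infix_append_sep (c : Char) (s l1 l2 : List Char) (hc : c ∉ s) :
    s <:+: l1 ++ c :: l2 ↔ s <:+: l1 ∨ s <:+: l2 := by
  constructor
  · intro h
    induction l1 with
    | nil =>
      simp only [List.nil_append] at h
      rcases List.infix_cons_iff.mp h with h | h
      · cases s with
        | nil => exact Or.inl List.nil_infix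
        | cons x s =>
          rcases List.cons_prefix_cons.mp h with ⟨rfl, _⟩
          exact absurd List.mem_cons_self hc
      · exact Or.inr h
    | cons a l1 ih =>
      rcases List.infix_cons_iff.mp h with h | h
      · exact Or.inl (List.IsPrefix.isInfix
          (prefix_of_prefix_append_sep c s (a :: l1) l2 hc (by simpa using h)))
      · rcases ih h with h | h
        · exact Or.inl (List.infix_cons h)
        · exact Or.inr h
  · rintro (h | h)
    · exact h.trans ⟨[], c :: l2, by simp⟩
    · exact h.trans ⟨l1 ++ [c], [], by simp⟩

-- a newline-free nonempty pattern is an infix of the newline-join iff it is an infix of some part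
lemma infix_join_newline (s : List Char) (hs : s ≠ []) (hc : '\n' ∉ s)
    (parts : List (List Char)) :
    s <:+: PySem.Chars.join ['\n'] parts ↔ ∃ p ∈ parts, s <:+: p := by
  induction parts with
  | nil =>
    simp only [PySem.Chars.join_nil, List.not_mem_nil]
    constructor
    · intro h; exact absurd (List.eq_nil_of_infix_nil h) hs
    · rintro ⟨p, hp, -⟩; exact hp.elim
  | cons p parts ih =>
    cases parts with
    | nil =>
      rw [PySem.Chars.join_singleton]
      simp
    | cons q parts =>
      rw [PySem.Chars.join_cons_cons, List.append_assoc, List.singleton_append,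
        infix_append_sep '\n' s p _ hc, ih]
      constructor
      · rintro (h | ⟨r, hr, h⟩)
        · exact ⟨p, List.mem_cons_self, h⟩
        · exact ⟨r, List.mem_cons_of_mem _ hr, h⟩
      · rintro ⟨r, hr, h⟩
        rcases List.mem_cons.mp hr with rfl | hr
        · exact Or.inl h
        · exact Or.inr ⟨r, hr, h⟩

-- A's nested any-over-any equals B's keyword scan over the newline-join
lemma any_any_eq_any_join (kws certs : List String)
    (h : ∀ kw ∈ kws, kw.toList ≠ [] ∧ '\n' ∉ kw.toList) :
    certs.any (fun cert => kws.any (fun kw => PySem.Str.isIn kw cert))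
      = kws.any (fun kw => PySem.Str.isIn kw (PySem.Str.join "\n" certs)) := by
  apply Bool.eq_iff_iff.mpr
  simp only [List.any_eq_true, PySem.Str.isIn_eq, PySem.Chars.isIn_iff_infix,
    PySem.Str.toList_join]
  have hsep : ("\n" : String).toList = ['\n'] := rfl
  constructor
  · rintro ⟨cert, hcert, kw, hkw, hin⟩
    refine ⟨kw, hkw, ?_⟩
    rw [hsep, infix_join_newline _ (h kw hkw).1 (h kw hkw).2]
    exact ⟨cert.toList, List.mem_map_of_mem hcert, hin⟩
  · rintro ⟨kw, hkw, hin⟩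
    rw [hsep, infix_join_newline _ (h kw hkw).1 (h kw hkw).2] at hin
    obtain ⟨p, hp, hin⟩ := hin
    obtain ⟨cert, hcert, rfl⟩ := List.mem_map.mp hp
    exact ⟨cert, hcert, kw, hkw, hin⟩

-- ===== VERDICT =====
theorem check_certification_spec : Claim_equal_check_certification := by
  intro candidate role _
  unfold Spec_check_certification check_certification check_certification_alt
  by_cases h1 : (PySem.Str.replace (PySem.Str.strip (PySem.Str.lower role)) " " "_"
      == "chartered_accountant") = true
  · simp only [h1, if_pos]
    exact any_any_eq_any_join _ _ (by decide)
  · simp only [h1, Bool.false_eq_true, if_false]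
    by_cases h2 : (PySem.Str.replace (PySem.Str.strip (PySem.Str.lower role)) " " "_"
        == "auditor") = true
    · simp only [h2, if_pos]
      exact any_any_eq_any_join _ _ (by decide)
    · simp only [h2, Bool.false_eq_true, if_false]
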